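-- pv_equiv track=rewrite | github.com/heissenberg303/leet-code-grinding | python/matrixsum.py | solution
-- ===== SOURCE A (Python) =====
-- def solution(matrix):
--     sum_matrix = 0
--
--     haunted_room = []
--     for i in range(0, len(matrix)):
--         for j in range(len(matrix[0])):
--             if matrix[i][j] == 0:
--                 haunted_room.append(j)
--         for k in range(len(matrix[0])):
--
--             if k not in haunted_room:
--                 sum_matrix += matrix[i][k]
--
--     return sum_matrix
-- ===== SOURCE B (Python) =====
-- def solution(matrix):
--     if not matrix:
--         return 0
--     n, m = len(matrix), len(matrix[0])
--     first_zero = [n] * m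
--     for i in range(n):
--         row = matrix[i]
--         for j in range(m):
--             if row[j] == 0 and first_zero[j] == n:
--                 first_zero[j] = i
--     return sum(matrix[i][j] for j in range(m) for i in range(first_zero[j]))
-- ===== Notes on version B (the rewrite author's own statement) =====
-- stated objective: faster
-- what changed: Replaces A's growing haunted-column list (re-appended per row, linear membership scan per cell) with a precomputed per-column first-zero boundary and a single summation pass.
import Mathlib
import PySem

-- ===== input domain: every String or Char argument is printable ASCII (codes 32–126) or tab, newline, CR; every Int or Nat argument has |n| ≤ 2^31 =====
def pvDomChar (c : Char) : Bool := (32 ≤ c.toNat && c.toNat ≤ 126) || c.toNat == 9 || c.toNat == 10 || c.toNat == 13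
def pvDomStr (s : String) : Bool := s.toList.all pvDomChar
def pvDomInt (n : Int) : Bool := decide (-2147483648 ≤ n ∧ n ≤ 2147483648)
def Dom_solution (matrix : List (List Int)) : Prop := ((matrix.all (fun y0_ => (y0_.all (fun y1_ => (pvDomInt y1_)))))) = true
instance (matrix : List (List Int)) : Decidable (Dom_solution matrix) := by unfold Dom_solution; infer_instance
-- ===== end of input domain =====

-- B replaces A's cumulative haunted-column list (linear membership scan per cell) by a
-- precomputed per-column first-zero boundary and a single summation pass (objective: faster).

-- ===== PORT A =====
-- A: row-by-row; collect haunted columns so far (with duplicates), then add matrix[i][k]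
-- for every k not in the haunted list.  Indices are always in range under Pre_, so
-- Python's matrix[i][j] is ported as List.getD (exact there).
def solution (matrix : List (List Int)) : Int :=
  let w := (matrix.headD []).length
  (matrix.foldl (fun (st : Int × List Nat) row =>
      let haunted := st.2 ++ (List.range w).filter (fun j => row.getD j 0 == 0)
      ((List.range w).foldl (fun acc k => if k ∈ haunted then acc else acc + row.getD k 0) st.1,
       haunted))
    (0, [])).1

-- ===== PORT B =====
-- helper: one step of B's first-zero scan for row i (the inner `for j in range(m)` loop body)
def bInner (matrix : List (List Int)) (n m i : Nat) (fz0 : List Nat) : List Nat :=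
  (List.range m).foldl (fun fz j =>
      if ((matrix.getD i []).getD j 0 == 0) && (fz.getD j n == n) then fz.set j i else fz)
    fz0

def solution_alt (matrix : List (List Int)) : Int :=
  match matrix with
  | [] => 0
  | r0 :: _ =>
    let n := matrix.length
    let m := r0.length
    let fz := (List.range n).foldl (fun fz i => bInner matrix n m i fz) (List.replicate m n)
    (List.range m).foldl (fun acc j =>
        (List.range (fz.getD j n)).foldl (fun acc i => acc + (matrix.getD i []).getD j 0) acc)
      0

-- ===== PRECONDITION & SPEC =====
-- Pre_ excludes ragged matrices in which some row is shorter than the first row: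
-- there Python A (and B) raise IndexError.
def Pre_solution (matrix : List (List Int)) : Prop :=
  ∀ row ∈ matrix, (matrix.headD []).length ≤ row.length
instance (matrix : List (List Int)) : Decidable (Pre_solution matrix) := by
  unfold Pre_solution; infer_instance

def pvWitness_solution : List (List Int) := [[1, 0, 3], [4, 5, 0], [7, 8, 9]]

def Spec_solution (matrix : List (List Int)) (out : Int) : Prop := out = solution_alt matrix
instance (matrix : List (List Int)) (out : Int) : Decidable (Spec_solution matrix out) := by
  unfold Spec_solution; infer_instance

-- ===== CLAIM (what is proved, stated in full; the proofs are below) =====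
def Claim_equal_solution : Prop :=
  ∀ (matrix : List (List Int)), Dom_solution matrix → Pre_solution matrix →
    Spec_solution matrix (solution matrix)

-- ===== LEMMAS AND PROOFS =====

-- `Z matrix i j` : entry (i, j) of the matrix is zero (via the same total indexing as the ports)
def Z (matrix : List (List Int)) (i j : Nat) : Bool :=
  (matrix.getD i []).getD j 0 == 0

-- A's running sum over one row, as a Finset sum
lemma foldl_range_if_sum (w : Nat) (p : Nat → Prop) [DecidablePred p] (f : Nat → Int) (s : Int) :
    (List.range w).foldl (fun acc k => if p k then acc else acc + f k) s
      = s + ∑ k ∈ Finset.range w, if p k then 0 else f k := by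
  induction w generalizing s with
  | zero => simp
  | succ w ih =>
      rw [List.range_succ, List.foldl_append, Finset.sum_range_succ, ih]
      by_cases h : p w <;> simp [h] <;> ring

lemma foldl_range_add_sum (w : Nat) (f : Nat → Int) (s : Int) :
    (List.range w).foldl (fun acc k => acc + f k) s = s + ∑ k ∈ Finset.range w, f k := by
  induction w generalizing s with
  | zero => simp
  | succ w ih => rw [List.range_succ, List.foldl_append, Finset.sum_range_succ, ih]; simp; ring

-- the value A accumulates from a list of rows, given the set of already-haunted columns
def ASum (w : Nat) (dead : Nat → Bool) : List (List Int) → Int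
  | [] => 0
  | r :: rs =>
      (∑ k ∈ Finset.range w, if (dead k || (r.getD k 0 == 0)) = true then 0 else r.getD k 0)
        + ASum w (fun k => dead k || (r.getD k 0 == 0)) rs

lemma ASum_congr (w : Nat) (rows : List (List Int)) :
    ∀ d₁ d₂ : Nat → Bool, (∀ k < w, d₁ k = d₂ k) → ASum w d₁ rows = ASum w d₂ rows := by
  induction rows with
  | nil => intro _ _ _; rfl
  | cons r rs ih =>
      intro d₁ d₂ h
      unfold ASum
      have h1 : (∑ k ∈ Finset.range w, if (d₁ k || (r.getD k 0 == 0)) = true then 0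
                  else r.getD k 0)
          = ∑ k ∈ Finset.range w, if (d₂ k || (r.getD k 0 == 0)) = true then 0
                  else r.getD k 0 := by
        refine Finset.sum_congr rfl (fun k hk => ?_)
        rw [h k (Finset.mem_range.mp hk)]
      rw [h1, ih _ _ (fun k hk => by rw [h k hk])]

lemma A_fold (w : Nat) (rows : List (List Int)) :
    ∀ (s : Int) (H : List Nat),
      (rows.foldl (fun (st : Int × List Nat) row =>
          let haunted := st.2 ++ (List.range w).filter (fun j => row.getD j 0 == 0)
          ((List.range w).foldl
              (fun acc k => if k ∈ haunted then acc else acc + row.getD k 0) st.1,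
           haunted)) (s, H)).1
        = s + ASum w (fun k => decide (k ∈ H)) rows := by
  induction rows with
  | nil => intro s H; simp [ASum]
  | cons r rs ih =>
      intro s H
      rw [List.foldl_cons]
      simp only []
      rw [ih, foldl_range_if_sum]
      have hmem : ∀ k < w,
          decide (k ∈ H ++ (List.range w).filter (fun j => r.getD j 0 == 0))
            = (decide (k ∈ H) || (r.getD k 0 == 0)) := by
        intro k hk
        by_cases hH : k ∈ H <;> by_cases hz : r.getD k 0 = 0 <;>
          simp [hH, hk, List.mem_filter, List.mem_range, ← Bool.beq_eq_decide_eq]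
      have h1 : (∑ k ∈ Finset.range w,
            if k ∈ H ++ (List.range w).filter (fun j => r.getD j 0 == 0) then 0
            else r.getD k 0)
          = ∑ k ∈ Finset.range w,
            if (decide (k ∈ H) || (r.getD k 0 == 0)) = true then 0 else r.getD k 0 := by
        refine Finset.sum_congr rfl (fun k hk => ?_)
        have hkw := Finset.mem_range.mp hk
        by_cases hH : k ∈ H <;> by_cases hz : r.getD k 0 = 0 <;>
          simp [hH, hkw, List.mem_append, List.mem_filter, List.mem_range]
      rw [h1, ASum_congr w rs _ _ (fun k hk => hmem k hk)]
      simp only [ASum]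
      ring

-- `colZero matrix t j` : some row i < t has a zero in column j
def colZero (matrix : List (List Int)) (t j : Nat) : Bool :=
  (List.range t).any (fun i => Z matrix i j)

lemma colZero_cons_succ (r : List Int) (rs : List (List Int)) (t j : Nat) :
    colZero (r :: rs) (t + 1) j = ((r.getD j 0 == 0) || colZero rs t j) := by
  unfold colZero Z
  rw [List.range_succ_eq_map]
  simp [List.any_map, Function.comp_def, List.getElem?_cons_succ]

lemma ASum_eq_sum (w : Nat) (rows : List (List Int)) :
    ∀ dead : Nat → Bool,
      ASum w dead rows
        = ∑ i ∈ Finset.range rows.length, ∑ k ∈ Finset.range w,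
            if (dead k || colZero rows (i + 1) k) = true then 0 else (rows.getD i []).getD k 0 := by
  induction rows with
  | nil => intro dead; simp [ASum]
  | cons r rs ih =>
      intro dead
      unfold ASum
      rw [ih]
      simp only [List.length_cons]
      rw [Finset.sum_range_succ']
      have h0 : (∑ k ∈ Finset.range w,
            if (dead k || colZero (r :: rs) (0 + 1) k) = true then 0
            else ((r :: rs).getD 0 []).getD k 0)
          = ∑ k ∈ Finset.range w, if (dead k || (r.getD k 0 == 0)) = true then 0
            else r.getD k 0 := by
        refine Finset.sum_congr rfl (fun k hk => ?_)
        rw [colZero_cons_succ]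
        unfold colZero
        simp
      have h1 : ∀ i ∈ Finset.range rs.length,
          (∑ k ∈ Finset.range w,
            if (dead k || colZero (r :: rs) (i + 1 + 1) k) = true then 0
            else ((r :: rs).getD (i + 1) []).getD k 0)
          = ∑ k ∈ Finset.range w,
            if ((fun k => dead k || (r.getD k 0 == 0)) k || colZero rs (i + 1) k) = true then 0
            else (rs.getD i []).getD k 0 := by
        intro i _
        refine Finset.sum_congr rfl (fun k hk => ?_)
        rw [colZero_cons_succ]
        simp only [List.getD_cons_succ]
        congr 1
        simp [Bool.or_assoc]
      rw [Finset.sum_congr rfl h1, h0]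
      ring

-- recursive description of B's first-zero boundary for column j after scanning t rows
def fzVal (matrix : List (List Int)) (n j : Nat) : Nat → Nat
  | 0 => n
  | t + 1 =>
      if Z matrix t j && (fzVal matrix n j t == n) then t else fzVal matrix n j t

lemma bInner_length (matrix : List (List Int)) (n m i : Nat) (L : List Nat) :
    (bInner matrix n m i L).length = L.length := by
  unfold bInner
  induction (List.range m) generalizing L with
  | nil => rfl
  | cons a as ih =>
      simp only [List.foldl_cons]
      split
      · rw [ih, List.length_set]
      · rw [ih]

lemma bInner_getD_ge (matrix : List (List Int)) (n i : Nat) (L : List Nat) :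
    ∀ m j, m ≤ j → (bInner matrix n m i L).getD j n = L.getD j n := by
  intro m
  induction m generalizing L with
  | zero => intro j _; rfl
  | succ m ih =>
      intro j hj
      unfold bInner
      rw [List.range_succ, List.foldl_append]
      simp only [List.foldl_cons, List.foldl_nil]
      have hne : m ≠ j := by omega
      split
      · rw [List.getD_eq_getElem?_getD, List.getElem?_set_ne hne, ← List.getD_eq_getElem?_getD]
        exact ih L j (by omega)
      · exact ih L j (by omega)

lemma bInner_getD_lt (matrix : List (List Int)) (n i : Nat) (L : List Nat) :
    ∀ m j, j < m → j < L.length →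
      (bInner matrix n m i L).getD j n
        = if Z matrix i j && (L.getD j n == n) then i else L.getD j n := by
  intro m
  induction m generalizing L with
  | zero => intro j hj _; omega
  | succ m ih =>
      intro j hj hjL
      unfold bInner
      rw [List.range_succ, List.foldl_append]
      simp only [List.foldl_cons, List.foldl_nil]
      by_cases hjm : j < m
      · have hne : m ≠ j := by omega
        have := ih L j hjm hjL
        unfold bInner at this
        split
        · rw [List.getD_eq_getElem?_getD, List.getElem?_set_ne hne, ← List.getD_eq_getElem?_getD]
          exact this
        · exact this
      · have hjeq : j = m := by omega
        subst hjeq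
        have hprev : ((List.range j).foldl (fun fz j' =>
            if ((matrix.getD i []).getD j' 0 == 0) && (fz.getD j' n == n) then fz.set j' i
            else fz) L).getD j n = L.getD j n := by
          have := bInner_getD_ge matrix n i L j j (le_refl j)
          unfold bInner at this; exact this
        have hlen : ((List.range j).foldl (fun fz j' =>
            if ((matrix.getD i []).getD j' 0 == 0) && (fz.getD j' n == n) then fz.set j' i
            else fz) L).length = L.length := by
          have := bInner_length matrix n j i L
          unfold bInner at this; exact this
        rw [hprev]
        unfold Z
        split
        · rw [List.getD_eq_getElem?_getD, List.getElem?_set_self (by omega)]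
          simp
        · exact hprev

-- the outer fold of B computes fzVal at every column
lemma B_fz (matrix : List (List Int)) (n m : Nat) :
    ∀ t, ∀ L, L = (List.range t).foldl (fun fz i => bInner matrix n m i fz)
        (List.replicate m n) →
      L.length = m ∧ ∀ j < m, L.getD j n = fzVal matrix n j t := by
  intro t
  induction t with
  | zero =>
      intro L hL
      subst hL
      refine ⟨by simp, fun j hj => ?_⟩
      simp [fzVal, List.getD_eq_getElem?_getD, hj]
  | succ t ih =>
      intro L hL
      rw [List.range_succ, List.foldl_append] at hL
      simp only [List.foldl_cons, List.foldl_nil] at hL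
      obtain ⟨hlen, hval⟩ := ih _ rfl
      subst hL
      refine ⟨by rw [bInner_length, hlen], fun j hj => ?_⟩
      rw [bInner_getD_lt matrix n t _ m j hj (by omega), hval j hj]
      simp [fzVal]

lemma fzVal_le (matrix : List (List Int)) (n j : Nat) : ∀ t, t ≤ n → fzVal matrix n j t ≤ n := by
  intro t
  induction t with
  | zero => intro _; simp [fzVal]
  | succ t ih =>
      intro h
      have hstep : fzVal matrix n j (t + 1)
          = if Z matrix t j && (fzVal matrix n j t == n) then t else fzVal matrix n j t := rfl
      rw [hstep]
      split
      · omega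
      · exact ih (by omega)

-- characterisation of fzVal: either no zero among the first t rows (value n), or the value
-- is the first row with a zero in column j
lemma fzVal_char (matrix : List (List Int)) (n j : Nat) :
    ∀ t, t ≤ n →
      (fzVal matrix n j t = n ∧ ∀ i < t, Z matrix i j = false) ∨
      (fzVal matrix n j t < t ∧ Z matrix (fzVal matrix n j t) j = true ∧
        ∀ i < fzVal matrix n j t, Z matrix i j = false) := by
  intro t
  induction t with
  | zero => intro _; left; exact ⟨rfl, by omega⟩
  | succ t ih =>
      intro h
      have hstep : fzVal matrix n j (t + 1)
          = if Z matrix t j && (fzVal matrix n j t == n) then t else fzVal matrix n j t := rfl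
      rcases ih (by omega) with ⟨hv, hall⟩ | ⟨hlt, hz, hall⟩
      · by_cases hzt : Z matrix t j
        · right
          have : fzVal matrix n j (t + 1) = t := by
            rw [hstep, hv]; simp [hzt]
          rw [this]
          exact ⟨by omega, hzt, hall⟩
        · left
          have : fzVal matrix n j (t + 1) = n := by
            rw [hstep, hv]; simp [Bool.eq_false_iff.mpr hzt]
          rw [this]
          refine ⟨rfl, fun i hi => ?_⟩
          by_cases hit : i < t
          · exact hall i hit
          · have : i = t := by omega
            subst this; exact Bool.eq_false_iff.mpr hzt
      · right
        have hne : fzVal matrix n j t ≠ n := by omega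
        have : fzVal matrix n j (t + 1) = fzVal matrix n j t := by
          rw [hstep]; simp [hne]
        rw [this]
        exact ⟨by omega, hz, hall⟩

-- B as a Finset double sum
lemma B_sum (r0 : List Int) (rest : List (List Int)) :
    solution_alt (r0 :: rest)
      = ∑ j ∈ Finset.range r0.length,
          ∑ i ∈ Finset.range (fzVal (r0 :: rest) (r0 :: rest).length j (r0 :: rest).length),
            ((r0 :: rest).getD i []).getD j 0 := by
  unfold solution_alt
  simp only []
  obtain ⟨hlen, hval⟩ :=
    B_fz (r0 :: rest) (r0 :: rest).length r0.length (r0 :: rest).length _ rfl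
  have key : ∀ (s : Int) (mm : Nat), mm ≤ r0.length →
      (List.range mm).foldl (fun acc j =>
          (List.range (((List.range (r0 :: rest).length).foldl
              (fun fz i => bInner (r0 :: rest) (r0 :: rest).length r0.length i fz)
              (List.replicate r0.length (r0 :: rest).length)).getD j (r0 :: rest).length)).foldl
            (fun acc i => acc + ((r0 :: rest).getD i []).getD j 0) acc) s
        = s + ∑ j ∈ Finset.range mm,
            ∑ i ∈ Finset.range (fzVal (r0 :: rest) (r0 :: rest).length j (r0 :: rest).length),
              ((r0 :: rest).getD i []).getD j 0 := by
    intro s mm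
    induction mm generalizing s with
    | zero => intro _; simp
    | succ mm ih =>
        intro hmm
        rw [List.range_succ, List.foldl_append, Finset.sum_range_succ, ih _ (by omega)]
        simp only [List.foldl_cons, List.foldl_nil]
        rw [hval mm (by omega), foldl_range_add_sum]
        ring
  have h2 := key 0 r0.length (le_refl _)
  rw [h2]; ring

-- ===== VERDICT (by name: the statement is the Claim_ definition above) =====
theorem solution_spec : Claim_equal_solution := by
  intro matrix _ _
  unfold Spec_solution
  cases hm : matrix with
  | nil => simp [solution, solution_alt]
  | cons r0 rest =>
      rw [← hm]
      -- A as a double sum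
      have hA : solution matrix
          = ∑ i ∈ Finset.range matrix.length,
              ∑ k ∈ Finset.range (matrix.headD []).length,
                if colZero matrix (i + 1) k = true then 0 else (matrix.getD i []).getD k 0 := by
        unfold solution
        simp only []
        rw [A_fold, ASum_eq_sum]
        simp
      rw [hA, hm, B_sum r0 rest, ← hm]
      have hw : (matrix.headD []).length = r0.length := by rw [hm]; rfl
      rw [hw, Finset.sum_comm]
      refine Finset.sum_congr rfl (fun j hj => ?_)
      set n := matrix.length with hn
      set F := fzVal matrix n j n with hF
      have hFle : F ≤ n := fzVal_le matrix n j n (le_refl n)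
      have hchar := fzVal_char matrix n j n (le_refl n)
      -- inner sums agree: i < F ↔ no zero in rows ≤ i of column j
      have key : ∀ i < n, (colZero matrix (i + 1) j = false ↔ i < F) := by
        intro i hi
        unfold colZero
        rcases hchar with ⟨hv, hall⟩ | ⟨hlt, hz, hall⟩
        · constructor
          · intro _; omega
          · intro _
            simp only [List.any_eq_false]
            intro x hx
            rw [List.mem_range] at hx
            simp [hall x (by omega)]
        · constructor
          · intro hfalse
            by_contra hge
            have hFi : F ∈ List.range (i + 1) := by rw [List.mem_range]; omega
            have := List.any_eq_false.mp hfalse F hFi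
            rw [hz] at this; exact absurd this (by simp)
          · intro hiF
            simp only [List.any_eq_false]
            intro x hx
            rw [List.mem_range] at hx
            simp [hall x (by omega)]
      have hsub : ∑ i ∈ Finset.range F,
            (if colZero matrix (i + 1) j = true then 0 else (matrix.getD i []).getD j 0)
          = ∑ i ∈ Finset.range n,
            (if colZero matrix (i + 1) j = true then 0 else (matrix.getD i []).getD j 0) := by
        refine Finset.sum_subset (by intro x hx; simp only [Finset.mem_range] at *; omega)
          (fun i hi hni => ?_)
        rw [Finset.mem_range] at hi hni
        have : ¬ colZero matrix (i + 1) j = false := fun hf => hni ((key i hi).mp hf)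
        have hc : colZero matrix (i + 1) j = true := by
          cases h : colZero matrix (i + 1) j
          · exact absurd h this
          · rfl
        simp [hc]
      rw [← hsub]
      refine Finset.sum_congr rfl (fun i hi => ?_)
      rw [Finset.mem_range] at hi
      have hc : colZero matrix (i + 1) j = false := by
        rcases (key i (by omega)).symm with _
        exact (Bool.eq_false_iff.mpr (fun ht => by
          have := (key i (by omega))
          rw [ht] at this
          exact absurd ((this.mpr hi)) (by simp)))
      simp [hc]
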